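-- pv_equiv track=rewrite | github.com/nobnap/FP-project1 | src/project.py | lista_carateres
-- ===== SOURCE A (Python) =====
-- def lista_carateres(arg):
--
--     """lista_carateres: cad. carateres -> lista
--
--     Esta é uma função auxiliar que recebe uma cadeia de carateres e devolve uma
--     lista com tuplos constituidos por cada letra da cadeia e o número de vezes
--     que a mesma se repete. É utilizada nas funções eh_anagrama e validar_cifra.
--
--     Exemplo: "salA" -> [(1, "s"), (2, "a"), (1, "l")]
--     """
--
--     arg = list(arg)
--     tamanho = len(arg)
--     cont = 1
--     res = []
--     letras_ante = ()
--
--     #O .lower() foi utilizado para que a contagem inclua letras maiúsculas no mesmo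
--     #tuplo que a sua equivalente minúscula
--     for i in range(tamanho):
--         if arg[i] != "-" and arg[i].lower() not in letras_ante:
--             for j in range(i+1, tamanho):
--                 if arg[i].lower() == arg[j].lower():
--                     cont += 1
--             res += [(cont, arg[i].lower())]
--             letras_ante += (arg[i].lower(),)
--             cont = 1
--
--     return res
-- ===== SOURCE B (Python) =====
-- def lista_carateres(arg):
--     # One counting pass over the string into an insertion-ordered dict,
--     # then one emit pass over the dict's items (no inner rescan).
--     counts = {}
--     for ch in arg:
--         if ch != "-":
--             k = ch.lower()
--             counts[k] = counts.get(k, 0) + 1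
--     res = []
--     for k, v in counts.items():
--         res.append((v, k))
--     return res
-- ===== Notes on version B (the rewrite author's own statement) =====
-- stated objective: faster
-- what changed: Replaces A's per-letter inner rescan of the rest of the string (plus a seen-tuple membership test) with a single counting pass into an insertion-ordered dict followed by one emit pass over its items.
import Mathlib
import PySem

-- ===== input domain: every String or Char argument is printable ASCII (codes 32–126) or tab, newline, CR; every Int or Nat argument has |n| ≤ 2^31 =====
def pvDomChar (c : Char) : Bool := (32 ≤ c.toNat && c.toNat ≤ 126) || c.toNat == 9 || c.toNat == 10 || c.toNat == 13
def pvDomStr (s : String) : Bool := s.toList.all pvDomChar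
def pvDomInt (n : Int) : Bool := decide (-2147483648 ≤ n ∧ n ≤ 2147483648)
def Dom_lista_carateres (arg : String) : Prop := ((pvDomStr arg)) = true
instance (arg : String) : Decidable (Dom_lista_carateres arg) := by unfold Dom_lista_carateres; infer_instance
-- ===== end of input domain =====

-- B replaces A's per-letter rescan of the rest of the string with one counting
-- pass into an insertion-ordered dict plus one emit pass over its items.

-- ===== PORT A =====
-- A-side helper: the body of A's outer 'for i in range(tamanho)' loop,
-- state = (cont, res, letras_ante); the inner 'for j in range(i+1, tamanho)' loop is the nested foldl.
def pvBodyA (xs : List Char) (s : Int × List (Int × String) × List Char) (i : Int) :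
    Int × List (Int × String) × List Char :=
  let cont := s.1
  let res := s.2.1
  let letras_ante := s.2.2
  let c := PySem.List.pyGetD xs i ' '
  if c ≠ '-' ∧ PySem.Chars.lowerChar c ∉ letras_ante then
    let cont2 :=
      (PySem.List.pyRange (i + 1) (xs.length : Int) 1).foldl
        (fun cont j =>
          if PySem.Chars.lowerChar c = PySem.Chars.lowerChar (PySem.List.pyGetD xs j ' ') then
            cont + 1
          else cont) cont
    (1, res ++ [(cont2, String.singleton (PySem.Chars.lowerChar c))],
      letras_ante ++ [PySem.Chars.lowerChar c])
  else (cont, res, letras_ante)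

def lista_carateres (arg : String) : List (Int × String) :=
  let xs := arg.toList
  let tamanho : Int := xs.length
  let st := (PySem.List.pyRange 0 tamanho 1).foldl (pvBodyA xs) (1, [], [])
  st.2.1

-- ===== PORT B =====
def lista_carateres_alt (arg : String) : List (Int × String) :=
  let counts :=
    arg.toList.foldl
      (fun (d : PySem.Dict Char Int) ch =>
        if ch ≠ '-' then
          let k := PySem.Chars.lowerChar ch
          d.insert k (d.getD k 0 + 1)
        else d)
      PySem.Dict.empty
  counts.items.foldl (fun res kv => res ++ [(kv.2, String.singleton kv.1)]) []

-- ===== PRECONDITION & SPEC =====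
def Spec_lista_carateres (arg : String) (out : List (Int × String)) : Prop := out = lista_carateres_alt arg
instance (arg : String) (out : List (Int × String)) : Decidable (Spec_lista_carateres arg out) := by unfold Spec_lista_carateres; infer_instance

-- ===== CLAIM (what is proved, stated in full; the proofs are below) =====
def Claim_equal_lista_carateres : Prop := ∀ (arg : String), Dom_lista_carateres arg → Spec_lista_carateres arg (lista_carateres arg)

-- ===== LEMMAS AND PROOFS =====

-- the lowered non-dash characters of the input, in order
def pvLL (l : List Char) : List Char :=
  (l.filter (fun c => decide (c ≠ '-'))).map PySem.Chars.lowerChar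

-- first-occurrence dedup, structurally on the head
def pvDedup : List Char → List Char
  | [] => []
  | c :: t => c :: (pvDedup t).filter (fun k => decide (k ≠ c))

-- what A's outer loop appends to res, as structural recursion over the characters
def pvAux : List Char → List Char → List (Int × String)
  | [], _ => []
  | c :: t, seen =>
    if c ≠ '-' ∧ PySem.Chars.lowerChar c ∉ seen then
      (1 + (t.countP (fun cj => decide (PySem.Chars.lowerChar c = PySem.Chars.lowerChar cj)) : Int),
        String.singleton (PySem.Chars.lowerChar c)) ::
        pvAux t (seen ++ [PySem.Chars.lowerChar c])
    else pvAux t seen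

-- what A's outer loop does to letras_ante
def pvSeen : List Char → List Char → List Char
  | [], seen => seen
  | c :: t, seen =>
    if c ≠ '-' ∧ PySem.Chars.lowerChar c ∉ seen then
      pvSeen t (seen ++ [PySem.Chars.lowerChar c])
    else pvSeen t seen

theorem pv_low_ne_dash (c : Char) (h : c ≠ '-') : PySem.Chars.lowerChar c ≠ '-' := by
  unfold PySem.Chars.lowerChar PySem.Chars.isupper
  split_ifs with hU
  · simp only [decide_eq_true_eq, Bool.and_eq_true] at hU
    have h1 : 65 ≤ c.toNat := Char.le_def.mp hU.1
    have h2 : c.toNat ≤ 90 := Char.le_def.mp hU.2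
    intro hEq
    have h3 := congrArg Char.toNat hEq
    rw [Char.toNat_ofNat, if_pos (Or.inl (by omega : c.toNat + 32 < 0xd800))] at h3
    have hd : ('-' : Char).toNat = 45 := by decide
    rw [hd] at h3
    omega
  · exact h

theorem pv_low_dash : PySem.Chars.lowerChar '-' = '-' := by decide

theorem pv_beq_decide (a b : Char) : (a == b) = decide (a = b) := by
  by_cases h : a = b <;> simp [h]

theorem pv_mem_pvLL_ne_dash {k : Char} {l : List Char} (h : k ∈ pvLL l) : k ≠ '-' := by
  simp only [pvLL, List.mem_map, List.mem_filter, decide_eq_true_eq] at h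
  obtain ⟨c, ⟨_, hc⟩, rfl⟩ := h
  exact pv_low_ne_dash c hc

theorem pv_mem_pvDedup {k : Char} {L : List Char} (h : k ∈ pvDedup L) : k ∈ L := by
  induction L with
  | nil => simp [pvDedup] at h
  | cons c t ih =>
    simp only [pvDedup, List.mem_cons] at h ⊢
    rcases h with h | h
    · exact Or.inl h
    · exact Or.inr (ih (List.mem_of_mem_filter h))

theorem pv_foldl_add_eq (L : List Char) : ∀ (s : List Char),
    List.foldl PySem.Set.add s L = s ++ (pvDedup L).filter (fun k => !s.contains k) := by
  induction L with
  | nil => intro s; simp [pvDedup]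
  | cons c t ih =>
    intro s
    rw [List.foldl_cons, ih]
    by_cases hc : s.contains c
    · have hcm : c ∈ s := by simpa [List.contains_iff_mem] using hc
      have hadd : PySem.Set.add s c = s := by simp [PySem.Set.add, hcm]
      rw [hadd, pvDedup, List.filter_cons]
      simp only [hc, Bool.not_true, if_neg (by simp : ¬ (false = true))]
      rw [List.filter_filter]
      congr 1
      apply List.filter_congr
      intro k _
      by_cases hkc : k = c
      · subst hkc; simp [hcm]
      · simp [hkc]
    · have hcm : c ∉ s := by simpa [List.contains_iff_mem] using hc
      have hadd : PySem.Set.add s c = s ++ [c] := by simp [PySem.Set.add, hcm]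
      rw [hadd, pvDedup, List.filter_cons]
      simp only [hc, Bool.not_false]
      rw [List.append_assoc, List.singleton_append]
      congr 2
      rw [List.filter_filter]
      apply List.filter_congr
      intro k _
      by_cases hkc : k = c
      · subst hkc; simp [hcm]
      · simp [hkc]

theorem pv_ofList_eq_pvDedup (L : List Char) : PySem.Set.ofList L = pvDedup L := by
  have h := pv_foldl_add_eq L []
  simpa [PySem.Set.ofList, PySem.Set.empty] using h

theorem pv_aux_spec (l seen : List Char) :
    pvAux l seen =
      ((pvDedup (pvLL l)).filter (fun k => !seen.contains k)).map
        (fun k => ((l.countP (fun cj => k == PySem.Chars.lowerChar cj) : Int), String.singleton k)) := by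
  induction l generalizing seen with
  | nil => simp [pvAux, pvLL, pvDedup]
  | cons c t ih =>
    by_cases hdash : c = '-'
    · subst hdash
      have hLL : pvLL ('-' :: t) = pvLL t := by simp [pvLL]
      have hcond : ¬ (('-' : Char) ≠ '-' ∧ PySem.Chars.lowerChar '-' ∉ seen) := by simp
      rw [pvAux, if_neg hcond, ih, hLL]
      apply List.map_congr_left
      intro k hk
      have hkd : k ≠ '-' := pv_mem_pvLL_ne_dash (pv_mem_pvDedup (List.mem_of_mem_filter hk))
      rw [List.countP_cons]
      simp [pv_low_dash, pv_beq_decide, hkd]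
    · have hLL : pvLL (c :: t) = PySem.Chars.lowerChar c :: pvLL t := by
        simp [pvLL, hdash]
      by_cases hseen : PySem.Chars.lowerChar c ∈ seen
      · have hcond : ¬ (c ≠ '-' ∧ PySem.Chars.lowerChar c ∉ seen) := by
          intro hx; exact hx.2 hseen
        rw [pvAux, if_neg hcond, ih, hLL, pvDedup, List.filter_cons]
        have hcont : seen.contains (PySem.Chars.lowerChar c) = true := by
          simpa [List.contains_iff_mem] using hseen
        simp only [hcont, Bool.not_true, if_neg (by simp : ¬ (false = true))]
        simp only [List.filter_filter]
        have hfe : ∀ k ∈ pvDedup (pvLL t),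
            (!seen.contains k && decide (k ≠ PySem.Chars.lowerChar c)) = (!seen.contains k) := by
          intro k _
          by_cases hkc : k = PySem.Chars.lowerChar c
          · subst hkc; simp [hseen]
          · simp [hkc]
        rw [List.filter_congr hfe]
        apply List.map_congr_left
        intro k hk
        have hks : ¬ seen.contains k := by
          have := List.of_mem_filter hk
          simpa using this
        have hkc : k ≠ PySem.Chars.lowerChar c := by
          intro hEq; exact hks (hEq ▸ hcont)
        rw [List.countP_cons]
        simp [pv_beq_decide, hkc]
      · have hcond : (c ≠ '-' ∧ PySem.Chars.lowerChar c ∉ seen) := ⟨hdash, hseen⟩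
        rw [pvAux, if_pos hcond, ih, hLL, pvDedup, List.filter_cons]
        have hcont : seen.contains (PySem.Chars.lowerChar c) = false := by
          simpa [List.contains_iff_mem] using hseen
        simp only [hcont, Bool.not_false]
        congr 1
        · -- head
          simp only [List.countP_cons, pv_beq_decide]
          simp
          ring_nf
        · -- tail
          simp only [List.filter_filter]
          have hfe : ∀ k ∈ pvDedup (pvLL t),
              (!seen.contains k && decide (k ≠ PySem.Chars.lowerChar c))
                = (!(seen ++ [PySem.Chars.lowerChar c]).contains k) := by
            intro k _
            by_cases hkc : k = PySem.Chars.lowerChar c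
            · subst hkc; simp
            · simp [hkc]
          rw [List.filter_congr hfe]
          apply List.map_congr_left
          intro k hk
          have hkc : k ≠ PySem.Chars.lowerChar c := by
            have := List.of_mem_filter hk
            simp at this
            exact fun hEq => this.2 hEq
          rw [List.countP_cons]
          simp [pv_beq_decide, hkc]

theorem pv_A_loop (xs : List Char) (t : List Char) (a : Nat) (h : xs.drop a = t)
    (res : List (Int × String)) (seen : List Char) :
    (PySem.List.pyRange (a : Int) (xs.length : Int) 1).foldl (pvBodyA xs) (1, res, seen)
      = (1, res ++ pvAux t seen, pvSeen t seen) := by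
  induction t generalizing a res seen with
  | nil =>
    have hlen : xs.length ≤ a := List.drop_eq_nil_iff.mp h
    rw [PySem.List.pyRange_one_eq_nil (by exact_mod_cast hlen)]
    simp [pvAux, pvSeen]
  | cons c t' ih =>
    have ha : a < xs.length := by
      by_contra hcon
      rw [List.drop_eq_nil_iff.mpr (by omega)] at h
      exact List.cons_ne_nil _ _ h.symm
    have hdec := List.drop_eq_getElem_cons ha (l := xs)
    rw [h] at hdec
    obtain ⟨hc, ht'⟩ : xs[a] = c ∧ xs.drop (a + 1) = t' := by
      have h1 := hdec.symm
      exact ⟨(List.cons.injEq _ _ _ _).mp h1 |>.1, ((List.cons.injEq _ _ _ _).mp h1 |>.2)⟩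
    have hget : PySem.List.pyGetD xs (a : Int) ' ' = c := by
      rw [PySem.List.pyGetD_natCast, List.getD_eq_getElem?_getD, List.getElem?_eq_getElem ha,
        Option.getD_some, hc]
    rw [PySem.List.pyRange_one_cons (by exact_mod_cast ha), List.foldl_cons]
    have hbody : pvBodyA xs (1, res, seen) (a : Int) =
        if c ≠ '-' ∧ PySem.Chars.lowerChar c ∉ seen then
          (1, res ++ [((1 + (t'.countP (fun cj =>
              decide (PySem.Chars.lowerChar c = PySem.Chars.lowerChar cj)) : Int)),
            String.singleton (PySem.Chars.lowerChar c))],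
            seen ++ [PySem.Chars.lowerChar c])
        else (1, res, seen) := by
      rw [pvBodyA, hget]
      by_cases hcond : (c ≠ '-' ∧ PySem.Chars.lowerChar c ∉ seen)
      · rw [if_pos hcond, if_pos hcond]
        have hcast : (a : Int) + 1 = ((a + 1 : Nat) : Int) := by push_cast; ring
        rw [hcast, PySem.List.foldl_pyRange_pyGetD' xs ' '
          (fun cont cj => if PySem.Chars.lowerChar c = PySem.Chars.lowerChar cj then cont + 1 else cont)
          1 (by positivity)]
        rw [Int.toNat_natCast, ht']
        rw [PySem.List.foldl_ite_add_one
          (fun cj => PySem.Chars.lowerChar c = PySem.Chars.lowerChar cj) t' 1]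
      · rw [if_neg hcond, if_neg hcond]
    rw [hbody]
    have hcast1 : (a : Int) + 1 = ((a + 1 : Nat) : Int) := by push_cast; ring
    rw [hcast1]
    by_cases hcond : (c ≠ '-' ∧ PySem.Chars.lowerChar c ∉ seen)
    · rw [if_pos hcond, ih (a + 1) ht'
        (res ++ [((1 + (t'.countP (fun cj =>
            decide (PySem.Chars.lowerChar c = PySem.Chars.lowerChar cj)) : Int)),
          String.singleton (PySem.Chars.lowerChar c))]) (seen ++ [PySem.Chars.lowerChar c])]
      rw [pvAux, if_pos hcond, pvSeen, if_pos hcond]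
      simp
    · rw [if_neg hcond, ih (a + 1) ht' res seen, pvAux, if_neg hcond, pvSeen, if_neg hcond]

theorem pv_A_eq (arg : String) :
    lista_carateres arg = pvAux arg.toList [] := by
  have h := pv_A_loop arg.toList arg.toList 0 (by simp) [] []
  simp only [Nat.cast_zero] at h
  show ((PySem.List.pyRange 0 (arg.toList.length : Int) 1).foldl (pvBodyA arg.toList)
      (1, [], [])).2.1 = pvAux arg.toList []
  rw [h]
  simp

theorem pv_B_eq (arg : String) :
    lista_carateres_alt arg =
      (pvDedup (pvLL arg.toList)).map
        (fun k => (((pvLL arg.toList).count k : Int), String.singleton k)) := by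
  show ((arg.toList.foldl
      (fun (d : PySem.Dict Char Int) ch =>
        if ch ≠ '-' then
          d.insert (PySem.Chars.lowerChar ch) (d.getD (PySem.Chars.lowerChar ch) 0 + 1)
        else d)
      PySem.Dict.empty).items.foldl (fun res kv => res ++ [(kv.2, String.singleton kv.1)]) []) = _
  rw [PySem.List.foldl_ite_eq_foldl_filter (fun ch => ch ≠ '-')
    (fun (d : PySem.Dict Char Int) ch =>
      d.insert (PySem.Chars.lowerChar ch) (d.getD (PySem.Chars.lowerChar ch) 0 + 1))]
  rw [show (List.foldl
      (fun (d : PySem.Dict Char Int) ch =>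
        d.insert (PySem.Chars.lowerChar ch) (d.getD (PySem.Chars.lowerChar ch) 0 + 1))
      PySem.Dict.empty (arg.toList.filter (fun c => decide (c ≠ '-'))))
      = List.foldl (fun (d : PySem.Dict Char Int) k => d.insert k (d.getD k 0 + 1))
          PySem.Dict.empty (pvLL arg.toList) from by
        unfold pvLL
        exact (List.foldl_map (f := PySem.Chars.lowerChar)
          (g := fun (d : PySem.Dict Char Int) k => d.insert k (d.getD k 0 + 1))).symm]
  rw [PySem.Dict.foldl_insert_getD_add_one_eq_counter, PySem.Dict.items_counter]
  rw [PySem.List.foldl_append_singleton_eq_map]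
  rw [pv_ofList_eq_pvDedup]
  simp [List.map_map, Function.comp_def]

theorem pv_count_bridge (xs : List Char) {k : Char} (hk : k ∈ pvLL xs) :
    (pvLL xs).count k = xs.countP (fun cj => k == PySem.Chars.lowerChar cj) := by
  have hkd : k ≠ '-' := pv_mem_pvLL_ne_dash hk
  unfold pvLL
  rw [List.count_eq_countP, List.countP_map, List.countP_filter]
  apply List.countP_congr
  intro a _
  by_cases hac : PySem.Chars.lowerChar a = k
  · have had : a ≠ '-' := by
      intro hEq; rw [hEq, pv_low_dash] at hac; exact hkd hac.symm
    simp [hac, had, pv_beq_decide]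
  · have hka : ¬ k = PySem.Chars.lowerChar a := fun h => hac h.symm
    simp [pv_beq_decide, hac, hka]

-- ===== VERDICT (by name: the statement is the Claim_ definition above) =====
theorem lista_carateres_spec : Claim_equal_lista_carateres := by
  intro arg _
  unfold Spec_lista_carateres
  rw [pv_A_eq, pv_B_eq, pv_aux_spec]
  simp only [List.contains_nil, Bool.not_false, List.filter_true]
  refine List.map_congr_left ?_
  intro k hk
  have hkL : k ∈ pvLL arg.toList := pv_mem_pvDedup hk
  rw [pv_count_bridge arg.toList hkL]
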